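-- pv_equiv track=rewrite | github.com/Harsha081459/-Question-Answering-System-with-a-Custom-Transformer-Encoder-and-Generative-Decoder | generative_data.py | _slice_sentence_around_index
-- ===== SOURCE A (Python) =====
-- def _slice_sentence_around_index(context: str, char_index: int) -> str:
--     """Extracts the full sentence containing the character at the specified index."""
--     if not context:
--         return ""
--     if char_index < 0:
--         char_index = 0
--     if char_index >= len(context):
--         char_index = len(context) - 1
--
--     # Find the nearest sentence-ending punctuation to the left of the char_index.
--     left_candidates = [
--         context.rfind(".", 0, char_index),
--         context.rfind("?", 0, char_index),
--         context.rfind("!", 0, char_index),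
--     ]
--     left = max(left_candidates)
--     start = 0 if left == -1 else left + 1
--
--     # Find the nearest sentence-ending punctuation to the right of the char_index.
--     right_positions = []
--     for ch in (".", "?", "!"):
--         pos = context.find(ch, char_index)
--         if pos != -1:
--             right_positions.append(pos + 1)
--     end = min(right_positions) if right_positions else len(context)
--     return context[start:end].strip()
-- ===== SOURCE B (Python) =====
-- def _slice_sentence_around_index(context: str, char_index: int) -> str:
--     """Extracts the full sentence containing the character at the specified index."""
--     if not context:
--         return ""
--     n = len(context)
--     idx = min(max(char_index, 0), n - 1)
--     # Partition the text once: each terminator at position i ends a sentence at cut i + 1.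
--     cuts = [i + 1 for i, c in enumerate(context) if c in ".?!"]
--     start = 0
--     for cut in cuts:
--         if cut <= idx:
--             start = cut
--         else:
--             return context[start:cut].strip()
--     return context[start:n].strip()
-- ===== Notes on version B (the rewrite author's own statement) =====
-- stated objective: alternative
-- what changed: Replaces the bidirectional nearest-terminator search (three rfind + three find calls aggregated with max/min) by a single left-to-right partition of the text into sentence cut points, then selecting the segment that contains the clamped index.
import Mathlib
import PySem

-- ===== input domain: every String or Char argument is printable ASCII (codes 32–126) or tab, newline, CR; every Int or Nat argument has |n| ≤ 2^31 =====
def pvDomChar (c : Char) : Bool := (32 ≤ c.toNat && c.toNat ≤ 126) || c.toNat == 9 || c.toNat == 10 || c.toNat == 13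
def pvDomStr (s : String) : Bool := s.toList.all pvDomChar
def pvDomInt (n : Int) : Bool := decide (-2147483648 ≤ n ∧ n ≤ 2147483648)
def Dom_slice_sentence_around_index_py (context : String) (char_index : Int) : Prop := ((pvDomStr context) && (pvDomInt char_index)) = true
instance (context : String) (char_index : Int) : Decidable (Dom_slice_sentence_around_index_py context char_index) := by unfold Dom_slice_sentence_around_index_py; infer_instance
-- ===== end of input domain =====

-- B replaces A's bidirectional nearest-terminator search (three rfind + three find, max/min)
-- by one left-to-right partition into sentence cut points and selection of the segment
-- containing the clamped index (objective: alternative algorithm, same cost).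

-- ===== PORT A =====
def slice_sentence_around_index_py (context : String) (char_index : Int) : String :=
  if context = "" then ""
  else
    let n : Int := PySem.Str.len context
    let ci1 : Int := if char_index < 0 then 0 else char_index
    let ci : Int := if ci1 ≥ n then n - 1 else ci1
    let leftCandidates : List Int :=
      [PySem.Str.rfindFrom context "." 0 (some ci),
       PySem.Str.rfindFrom context "?" 0 (some ci),
       PySem.Str.rfindFrom context "!" 0 (some ci)]
    let left : Int := (PySem.List.max? leftCandidates id).getD 0
    let start : Int := if left = -1 then 0 else left + 1
    let rightPositions : List Int :=
      [".", "?", "!"].foldl (fun acc ch =>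
        let pos := PySem.Str.findFrom context ch ci
        if pos ≠ -1 then acc ++ [pos + 1] else acc) []
    let e : Int :=
      match PySem.List.min? rightPositions id with
      | some m => m
      | none => n
    PySem.Str.strip (PySem.Str.slice context (some start) (some e))

-- ===== PORT B =====
-- `c in ".?!"` for a single character
def pvIsTerm (c : Char) : Bool := c == '.' || c == '?' || c == '!'

-- `cuts = [i + 1 for i, c in enumerate(context) if c in ".?!"]`
def pvCuts (cs : List Char) : List Int :=
  (PySem.List.enumerate cs 0).filterMap (fun p => if pvIsTerm p.2 then some (p.1 + 1) else none)

-- the `for cut in cuts` loop of B, with the two `return context[...].strip()` exits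
def pvSelect (context : String) (idx n : Int) : Int → List Int → String
  | start, [] => PySem.Str.strip (PySem.Str.slice context (some start) (some n))
  | start, cut :: rest =>
      if cut ≤ idx then pvSelect context idx n cut rest
      else PySem.Str.strip (PySem.Str.slice context (some start) (some cut))

def slice_sentence_around_index_py_alt (context : String) (char_index : Int) : String :=
  let cs := context.toList
  if cs = [] then ""
  else
    let n : Int := cs.length
    let idx : Int := min (max char_index 0) (n - 1)
    pvSelect context idx n 0 (pvCuts cs)

-- ===== PRECONDITION & SPEC =====
def Spec_slice_sentence_around_index_py (context : String) (char_index : Int) (out : String) : Prop := out = slice_sentence_around_index_py_alt context char_index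
instance (context : String) (char_index : Int) (out : String) : Decidable (Spec_slice_sentence_around_index_py context char_index out) := by unfold Spec_slice_sentence_around_index_py; infer_instance

-- ===== CLAIM (what is proved, stated in full; the proofs are below) =====
def Claim_equal_slice_sentence_around_index_py : Prop := ∀ (context : String) (char_index : Int), Dom_slice_sentence_around_index_py context char_index → Spec_slice_sentence_around_index_py context char_index (slice_sentence_around_index_py context char_index)

-- ===== LEMMAS AND PROOFS =====

-- reference left scan: last terminator position + 1 strictly below the bound, else 0
def pvIsTermO : Option Char → Bool
  | some c => pvIsTerm c
  | none => false

def pvScanLeft (cs : List Char) : Nat → Nat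
  | 0 => 0
  | j + 1 => if pvIsTermO cs[j]? then j + 1 else pvScanLeft cs j

-- reference right scan over a suffix starting at absolute position k
def pvScanRight : List Char → Nat → Nat
  | [], k => k
  | c :: rest, k => if pvIsTerm c then k + 1 else pvScanRight rest (k + 1)

-- [c].isPrefixOf t tests the head
theorem pvSingle_isPrefixOf (c : Char) (t : List Char) :
    [c].isPrefixOf t = decide (t[0]? = some c) := by
  cases t with
  | nil => simp [List.isPrefixOf]
  | cons a t =>
    simp only [List.isPrefixOf, List.getElem?_cons_zero]
    by_cases h : a = c
    · simp [h]
    · simp [h]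
      intro h'
      exact absurd h'.symm h

theorem pvRgo_zero (s : List Char) (c : Char) :
    PySem.Chars.rfind.go s [c] 0 = if s[0]? = some c then 0 else -1 := by
  simp [PySem.Chars.rfind.go, pvSingle_isPrefixOf]

theorem pvRgo_succ (s : List Char) (c : Char) (j : Nat) :
    PySem.Chars.rfind.go s [c] (j + 1) =
      if s[j + 1]? = some c then ((j : Int) + 1) else PySem.Chars.rfind.go s [c] j := by
  have hd : (List.drop (j + 1) s)[0]? = s[j + 1]? := by
    simp [List.getElem?_drop]
  simp [PySem.Chars.rfind.go, pvSingle_isPrefixOf, hd]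

theorem pvRgo_le (s : List Char) (c : Char) (m : Nat) :
    PySem.Chars.rfind.go s [c] m ≤ (m : Int) := by
  induction m with
  | zero => rw [pvRgo_zero]; split <;> omega
  | succ j ih => rw [pvRgo_succ]; split <;> omega

-- the max of the three single-character backward searches IS the backward scan
theorem pvLeft_main (s : List Char) (m : Nat) :
    (if max (max (PySem.Chars.rfind.go s ['.'] m) (PySem.Chars.rfind.go s ['?'] m))
         (PySem.Chars.rfind.go s ['!'] m) = -1 then (0 : Int)
     else max (max (PySem.Chars.rfind.go s ['.'] m) (PySem.Chars.rfind.go s ['?'] m))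
         (PySem.Chars.rfind.go s ['!'] m) + 1) = ((pvScanLeft s (m + 1) : Nat) : Int) := by
  induction m with
  | zero =>
    rw [pvRgo_zero, pvRgo_zero, pvRgo_zero]
    rcases h : s[0]? with _ | c
    · simp [pvScanLeft, h, pvIsTermO]
    · by_cases h1 : c = '.'
      · simp [pvScanLeft, h, pvIsTermO, pvIsTerm, h1]
      · by_cases h2 : c = '?'
        · simp [pvScanLeft, h, pvIsTermO, pvIsTerm, h2]
        · by_cases h3 : c = '!'
          · simp [pvScanLeft, h, pvIsTermO, pvIsTerm, h3]
          · simp [pvScanLeft, h, pvIsTermO, pvIsTerm, h1, h2, h3]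
  | succ j ih =>
    rw [pvRgo_succ, pvRgo_succ, pvRgo_succ]
    rcases h : s[j + 1]? with _ | c
    · simpa [pvScanLeft, h, pvIsTermO] using ih
    · have l1 := pvRgo_le s '.' j
      have l2 := pvRgo_le s '?' j
      have l3 := pvRgo_le s '!' j
      by_cases h1 : c = '.'
      · have hm : max (max ((j : Int) + 1) (PySem.Chars.rfind.go s ['?'] j))
            (PySem.Chars.rfind.go s ['!'] j) = (j : Int) + 1 := by
          rw [max_eq_left (le_trans l2 (by omega)), max_eq_left (le_trans l3 (by omega))]
        have e1 : (if (some '.' : Option Char) = some '.' then ((j : Int) + 1)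
            else PySem.Chars.rfind.go s ['.'] j) = (j : Int) + 1 := if_pos rfl
        have e2 : (if (some '.' : Option Char) = some '?' then ((j : Int) + 1)
            else PySem.Chars.rfind.go s ['?'] j) = PySem.Chars.rfind.go s ['?'] j := if_neg (by decide)
        have e3 : (if (some '.' : Option Char) = some '!' then ((j : Int) + 1)
            else PySem.Chars.rfind.go s ['!'] j) = PySem.Chars.rfind.go s ['!'] j := if_neg (by decide)
        rw [h1, e1, e2, e3, hm, if_neg (by omega : ¬ ((j : Int) + 1 = -1))]
        simp [pvScanLeft, h, pvIsTermO, pvIsTerm, h1]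
      · by_cases h2 : c = '?'
        · have hm : max (max (PySem.Chars.rfind.go s ['.'] j) ((j : Int) + 1))
              (PySem.Chars.rfind.go s ['!'] j) = (j : Int) + 1 := by
            rw [max_eq_right (le_trans l1 (by omega)), max_eq_left (le_trans l3 (by omega))]
          have e1 : (if (some '?' : Option Char) = some '?' then ((j : Int) + 1)
              else PySem.Chars.rfind.go s ['?'] j) = (j : Int) + 1 := if_pos rfl
          have e2 : (if (some '?' : Option Char) = some '.' then ((j : Int) + 1)
              else PySem.Chars.rfind.go s ['.'] j) = PySem.Chars.rfind.go s ['.'] j := if_neg (by decide)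
          have e3 : (if (some '?' : Option Char) = some '!' then ((j : Int) + 1)
              else PySem.Chars.rfind.go s ['!'] j) = PySem.Chars.rfind.go s ['!'] j := if_neg (by decide)
          rw [h2, e1, e2, e3, hm, if_neg (by omega : ¬ ((j : Int) + 1 = -1))]
          simp [pvScanLeft, h, pvIsTermO, pvIsTerm, h2]
        · by_cases h3 : c = '!'
          · have hm : max (max (PySem.Chars.rfind.go s ['.'] j) (PySem.Chars.rfind.go s ['?'] j))
                ((j : Int) + 1) = (j : Int) + 1 := by
              exact max_eq_right (max_le (le_trans l1 (by omega)) (le_trans l2 (by omega)))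
            have e1 : (if (some '!' : Option Char) = some '!' then ((j : Int) + 1)
                else PySem.Chars.rfind.go s ['!'] j) = (j : Int) + 1 := if_pos rfl
            have e2 : (if (some '!' : Option Char) = some '.' then ((j : Int) + 1)
                else PySem.Chars.rfind.go s ['.'] j) = PySem.Chars.rfind.go s ['.'] j := if_neg (by decide)
            have e3 : (if (some '!' : Option Char) = some '?' then ((j : Int) + 1)
                else PySem.Chars.rfind.go s ['?'] j) = PySem.Chars.rfind.go s ['?'] j := if_neg (by decide)
            rw [h3, e1, e2, e3, hm, if_neg (by omega : ¬ ((j : Int) + 1 = -1))]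
            simp [pvScanLeft, h, pvIsTermO, pvIsTerm, h3]
          · simp only [Option.some.injEq, if_neg (fun hh => h1 hh),
              if_neg (fun hh => h2 hh), if_neg (fun hh => h3 hh)]
            rw [ih]
            simp [pvScanLeft, h, pvIsTermO, pvIsTerm, h1, h2, h3]

theorem pvRfindFrom_eq (cs : List Char) (i : Nat) (hi : i ≤ cs.length) (c : Char) :
    PySem.Chars.rfindFrom cs [c] 0 (some (i : Int)) =
      PySem.Chars.rfind.go (cs.take i) [c] i := by
  have hlen : (List.take i cs).length = i := by simp [List.length_take, hi]
  have h1 : ¬ ((cs.length : Int) < (i : Int)) := not_lt.mpr (Nat.cast_le.mpr hi)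
  simp only [PySem.Chars.rfindFrom, PySem.Chars.rfind]
  have h2 : ¬ ((i : Int) < 0) := by omega
  norm_num [h1, h2, hlen, Int.toNat_natCast, min_eq_left hi]
  omega

theorem pvFind_ge (s : List Char) (c : Char) : (-1 : Int) ≤ PySem.Chars.find s [c] :=
  PySem.Chars.neg_one_le_find s [c]

theorem pvFgo_nil (c : Char) (k : Nat) : PySem.Chars.find.go [c] [] k = -1 := by
  simp [PySem.Chars.find.go]

theorem pvFgo_cons (c a : Char) (t : List Char) (k : Nat) :
    PySem.Chars.find.go [c] (a :: t) k =
      if a = c then (k : Int) else PySem.Chars.find.go [c] t (k + 1) := by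
  rw [show PySem.Chars.find.go [c] (a :: t) k =
      if [c].isPrefixOf (a :: t) then (k : Int) else PySem.Chars.find.go [c] t (k + 1) from rfl]
  rw [pvSingle_isPrefixOf]
  simp

-- find.go with a shifted counter
theorem pvFgo_shift (c : Char) (s : List Char) (k : Nat) :
    PySem.Chars.find.go [c] s k =
      if PySem.Chars.find s [c] = -1 then -1 else (k : Int) + PySem.Chars.find s [c] := by
  induction s generalizing k with
  | nil => simp [PySem.Chars.find, pvFgo_nil]
  | cons a t ih =>
    rw [pvFgo_cons,
      show PySem.Chars.find (a :: t) [c] = PySem.Chars.find.go [c] (a :: t) 0 from rfl,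
      pvFgo_cons]
    by_cases hac : a = c
    · simp [hac]
    · rw [if_neg hac, if_neg hac, ih (k + 1), ih 1]
      have hge := pvFind_ge t c
      by_cases hf : PySem.Chars.find t [c] = -1
      · simp [hf]
      · rw [if_neg hf, if_neg hf, if_neg (by omega)]
        push_cast
        ring

theorem pvFind_cons (c c0 : Char) (rest : List Char) :
    PySem.Chars.find (c0 :: rest) [c] =
      if c0 = c then 0
      else if PySem.Chars.find rest [c] = -1 then -1 else 1 + PySem.Chars.find rest [c] := by
  rw [show PySem.Chars.find (c0 :: rest) [c] = PySem.Chars.find.go [c] (c0 :: rest) 0 from rfl,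
    pvFgo_cons, pvFgo_shift]
  norm_num

-- the right-hand entries of A, as a function of the suffix and the offset
def pvRpEntry (d : List Char) (k : Nat) (c : Char) : List Int :=
  if PySem.Chars.find d [c] = -1 then [] else [(k : Int) + PySem.Chars.find d [c] + 1]

def pvRp (d : List Char) (k : Nat) : List Int :=
  pvRpEntry d k '.' ++ pvRpEntry d k '?' ++ pvRpEntry d k '!'

theorem pvFind_nil (c : Char) : PySem.Chars.find [] [c] = -1 := pvFgo_nil c 0

-- generic fold-minimum facts, abstracted over the step function of min?
theorem pvFoldMin_keep (f : Option Int → Int → Option Int)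
    (hsome : ∀ m y, f (some m) y = if y < m then some y else some m)
    (ys : List Int) (x : Int) (hy : ∀ y ∈ ys, x ≤ y) :
    List.foldl f (some x) ys = some x := by
  induction ys with
  | nil => rfl
  | cons y t ih =>
    rw [List.foldl_cons, hsome, if_neg (not_lt.mpr (hy y (by simp)))]
    exact ih (fun z hz => hy z (by simp [hz]))

theorem pvFoldMin_none_or_mem (f : Option Int → Int → Option Int)
    (hnone : ∀ y, f none y = some y)
    (hsome : ∀ m y, f (some m) y = if y < m then some y else some m)
    (xs : List Int) :
    List.foldl f none xs = none ∨ ∃ m ∈ xs, List.foldl f none xs = some m := by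
  induction xs using List.reverseRecOn with
  | nil => left; rfl
  | append_singleton t y ih =>
    right
    rcases ih with h | ⟨m, hm, h⟩
    · exact ⟨y, by simp, by rw [List.foldl_append, h, List.foldl_cons, hnone, List.foldl_nil]⟩
    · rw [List.foldl_append, h, List.foldl_cons, hsome, List.foldl_nil]
      by_cases hlt : y < m
      · exact ⟨y, by simp, by simp [hlt]⟩
      · exact ⟨m, by simp [hm], by simp [hlt]⟩

theorem pvFoldMin_gen (f : Option Int → Int → Option Int)
    (hnone : ∀ y, f none y = some y)
    (hsome : ∀ m y, f (some m) y = if y < m then some y else some m)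
    (xs : List Int) (x : Int) (ys : List Int)
    (h1 : ∀ z ∈ xs, x < z) (h2 : ∀ y ∈ ys, x ≤ y) :
    List.foldl f none (xs ++ x :: ys) = some x := by
  rw [List.foldl_append, List.foldl_cons]
  rcases pvFoldMin_none_or_mem f hnone hsome xs with h | ⟨m, hm, h⟩
  · rw [h, hnone]
    exact pvFoldMin_keep f hsome ys x h2
  · rw [h, hsome, if_pos (h1 m hm)]
    exact pvFoldMin_keep f hsome ys x h2

-- min? of xs ++ x :: ys is x when x is strictly below xs and weakly below ys
theorem pvMin_main (xs : List Int) (x : Int) (ys : List Int)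
    (h1 : ∀ z ∈ xs, x < z) (h2 : ∀ y ∈ ys, x ≤ y) :
    PySem.List.min? (xs ++ x :: ys) id = some x := by
  unfold PySem.List.min?
  exact pvFoldMin_gen _ (fun y => rfl) (fun m y => rfl) xs x ys h1 h2

theorem pvRpEntry_cons_ne (c c0 : Char) (rest : List Char) (k : Nat) (hne : c0 ≠ c) :
    pvRpEntry (c0 :: rest) k c = pvRpEntry rest (k + 1) c := by
  unfold pvRpEntry
  rw [pvFind_cons, if_neg hne]
  have hge := pvFind_ge rest c
  by_cases hf : PySem.Chars.find rest [c] = -1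
  · simp [hf]
  · rw [if_neg hf, if_neg (by omega), if_neg hf]
    have : (k : Int) + (1 + PySem.Chars.find rest [c]) + 1
        = ((k + 1 : Nat) : Int) + PySem.Chars.find rest [c] + 1 := by push_cast; ring
    rw [this]

-- a present entry for a character different from the head is at least k + 2
theorem pvRpEntry_cons_bound (c c0 : Char) (rest : List Char) (k : Nat) (hne : c0 ≠ c) :
    ∀ y ∈ pvRpEntry (c0 :: rest) k c, (k : Int) + 2 ≤ y := by
  intro y hy
  unfold pvRpEntry at hy
  rw [pvFind_cons, if_neg hne] at hy
  have hge := pvFind_ge rest c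
  by_cases hf : PySem.Chars.find rest [c] = -1
  · simp [hf] at hy
  · rw [if_neg hf, if_neg (by omega)] at hy
    simp at hy
    omega

theorem pvRpEntry_head (c : Char) (rest : List Char) (k : Nat) :
    pvRpEntry (c :: rest) k c = [(k : Int) + 1] := by
  unfold pvRpEntry
  rw [pvFind_cons, if_pos rfl]
  norm_num

-- the min of A's right-hand candidate list IS the forward scan
theorem pvRight_main (d : List Char) (k : Nat) :
    (match PySem.List.min? (pvRp d k) id with
     | some m => m
     | none => ((k + d.length : Nat) : Int)) = ((pvScanRight d k : Nat) : Int) := by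
  induction d generalizing k with
  | nil =>
    simp [pvRp, pvRpEntry, pvFind_nil, PySem.List.min?, pvScanRight]
  | cons c0 rest ih =>
    by_cases h1 : c0 = '.'
    · subst h1
      have hmin : PySem.List.min? (pvRp ('.' :: rest) k) id = some ((k : Int) + 1) := by
        have := pvMin_main [] ((k : Int) + 1)
          (pvRpEntry ('.' :: rest) k '?' ++ pvRpEntry ('.' :: rest) k '!')
          (by simp)
          (by intro y hy
              rcases List.mem_append.mp hy with h | h
              · have := pvRpEntry_cons_bound '?' '.' rest k (by decide) y h; omega
              · have := pvRpEntry_cons_bound '!' '.' rest k (by decide) y h; omega)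
        simpa [pvRp, pvRpEntry_head] using this
      rw [hmin]
      simp [pvScanRight, pvIsTerm]
    · by_cases h2 : c0 = '?'
      · subst h2
        have hmin : PySem.List.min? (pvRp ('?' :: rest) k) id = some ((k : Int) + 1) := by
          have := pvMin_main (pvRpEntry ('?' :: rest) k '.') ((k : Int) + 1)
            (pvRpEntry ('?' :: rest) k '!')
            (by intro z hz
                have := pvRpEntry_cons_bound '.' '?' rest k (by decide) z hz; omega)
            (by intro y hy
                have := pvRpEntry_cons_bound '!' '?' rest k (by decide) y hy; omega)
          simpa [pvRp, pvRpEntry_head, List.append_assoc] using this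
        rw [hmin]
        simp [pvScanRight, pvIsTerm]
      · by_cases h3 : c0 = '!'
        · subst h3
          have hmin : PySem.List.min? (pvRp ('!' :: rest) k) id = some ((k : Int) + 1) := by
            have := pvMin_main (pvRpEntry ('!' :: rest) k '.' ++ pvRpEntry ('!' :: rest) k '?')
              ((k : Int) + 1) []
              (by intro z hz
                  rcases List.mem_append.mp hz with h | h
                  · have := pvRpEntry_cons_bound '.' '!' rest k (by decide) z h; omega
                  · have := pvRpEntry_cons_bound '?' '!' rest k (by decide) z h; omega)
              (by simp)
            simpa [pvRp, pvRpEntry_head, List.append_assoc] using this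
          rw [hmin]
          simp [pvScanRight, pvIsTerm]
        · have hrp : pvRp (c0 :: rest) k = pvRp rest (k + 1) := by
            unfold pvRp
            rw [pvRpEntry_cons_ne _ _ _ _ (fun h => h1 h),
              pvRpEntry_cons_ne _ _ _ _ (fun h => h2 h),
              pvRpEntry_cons_ne _ _ _ _ (fun h => h3 h)]
          have hlen : k + (c0 :: rest).length = (k + 1) + rest.length := by
            simp [List.length_cons]; omega
          rw [hrp, hlen, ih (k + 1)]
          simp [pvScanRight, pvIsTerm, h1, h2, h3]

theorem pvFindFrom_eq (cs : List Char) (i : Nat) (hi : i < cs.length) (c : Char) :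
    PySem.Chars.findFrom cs [c] (i : Int) none =
      (if PySem.Chars.find (cs.drop i) [c] = -1 then -1
       else (i : Int) + PySem.Chars.find (cs.drop i) [c]) := by
  have h1 : ¬ ((cs.length : Int) < (i : Int)) := not_lt.mpr (Nat.cast_le.mpr (le_of_lt hi))
  have h2 : ¬ ((i : Int) < 0) := by omega
  simp only [PySem.Chars.findFrom]
  norm_num [h1, h2, Int.toNat_natCast, List.take_length]

theorem pvScanLeft_take (cs : List Char) (i : Nat) :
    ∀ m, m ≤ i → pvScanLeft (cs.take i) m = pvScanLeft cs m := by
  intro m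
  induction m with
  | zero => intro _; rfl
  | succ j ih =>
    intro hj
    have hji : j < i := by omega
    simp only [pvScanLeft, List.getElem?_take, if_pos hji]
    split
    · rfl
    · exact ih (by omega)

-- A's whole left computation equals the backward scan
theorem pvLeft_full (cs : List Char) (i : Nat) (hi : i ≤ cs.length) :
    (if max (max (PySem.Chars.rfind.go (cs.take i) ['.'] i)
          (PySem.Chars.rfind.go (cs.take i) ['?'] i))
        (PySem.Chars.rfind.go (cs.take i) ['!'] i) = -1 then (0 : Int)
     else max (max (PySem.Chars.rfind.go (cs.take i) ['.'] i)
          (PySem.Chars.rfind.go (cs.take i) ['?'] i))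
        (PySem.Chars.rfind.go (cs.take i) ['!'] i) + 1) = ((pvScanLeft cs i : Nat) : Int) := by
  cases i with
  | zero => simp [pvRgo_zero, pvScanLeft]
  | succ j =>
    have hnone : (cs.take (j + 1))[j + 1]? = none := by
      simp
    rw [pvRgo_succ, pvRgo_succ, pvRgo_succ, hnone]
    simp only [if_neg (by simp : ¬ ((none : Option Char) = some '.')),
      if_neg (by simp : ¬ ((none : Option Char) = some '?')),
      if_neg (by simp : ¬ ((none : Option Char) = some '!'))]
    rw [pvLeft_main (cs.take (j + 1)) j, pvScanLeft_take cs (j + 1) (j + 1) (le_refl _)]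

theorem pvMax3 (a b c : Int) : (PySem.List.max? [a, b, c] id).getD 0 = max (max a b) c := by
  simp only [PySem.List.max?, List.foldl, id]
  split_ifs <;> simp only [apply_ite (fun o : Option Int => o.getD 0), Option.getD_some] <;>
    split_ifs <;> omega

-- A's whole right computation equals pvRp
theorem pvRightA (context : String) (i : Nat) (hilt : i < context.toList.length) :
    List.foldl (fun acc ch =>
        let pos := PySem.Str.findFrom context ch (i : Int)
        if pos ≠ -1 then acc ++ [pos + 1] else acc) [] [".", "?", "!"]
      = pvRp (context.toList.drop i) i := by
  have e : ∀ (c : Char) (acc : List Int),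
      (let pos := PySem.Chars.findFrom context.toList [c] (i : Int)
       if pos ≠ -1 then acc ++ [pos + 1] else acc)
      = acc ++ pvRpEntry (context.toList.drop i) i c := by
    intro c acc
    rw [pvFindFrom_eq context.toList i hilt c]
    have hge := pvFind_ge (context.toList.drop i) c
    by_cases hf : PySem.Chars.find (context.toList.drop i) [c] = -1
    · simp [hf, pvRpEntry]
    · simp only [if_neg hf]
      rw [if_pos (by omega : ((i : Int) + PySem.Chars.find (context.toList.drop i) [c]) ≠ -1)]
      simp [pvRpEntry, hf]
  simp only [List.foldl]
  rw [show PySem.Str.findFrom context "." (i : Int) =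
        PySem.Chars.findFrom context.toList ['.'] (i : Int) by simp,
      show PySem.Str.findFrom context "?" (i : Int) =
        PySem.Chars.findFrom context.toList ['?'] (i : Int) by simp,
      show PySem.Str.findFrom context "!" (i : Int) =
        PySem.Chars.findFrom context.toList ['!'] (i : Int) by simp]
  rw [e '.' [], e '?' _, e '!' _]
  simp [pvRp, List.append_assoc]

-- ============ B-side: relate the cuts/select loop to the two scans ============

-- position-indexed version of pvCuts
def pvCutsFrom (k : Nat) : List Char → List Int
  | [] => []
  | c :: rest => if pvIsTerm c then ((k : Int) + 1) :: pvCutsFrom (k + 1) rest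
                 else pvCutsFrom (k + 1) rest

theorem pvCuts_eq_from (cs : List Char) : ∀ (k : Nat),
    (PySem.List.enumerate cs (k : Int)).filterMap
      (fun p => if pvIsTerm p.2 then some (p.1 + 1) else none) = pvCutsFrom k cs := by
  induction cs with
  | nil => intro k; simp [PySem.List.enumerate_nil, pvCutsFrom]
  | cons c rest ih =>
    intro k
    rw [PySem.List.enumerate_cons, List.filterMap_cons]
    have hc : (k : Int) + 1 = ((k + 1 : Nat) : Int) := by push_cast; ring
    rw [hc, ih (k + 1)]
    by_cases h : pvIsTerm c <;> simp [pvCutsFrom, h, ← hc]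
theorem pvCuts_eq (cs : List Char) : pvCuts cs = pvCutsFrom 0 cs := by
  have := pvCuts_eq_from cs 0
  simpa [pvCuts] using this

-- once past the index, the select loop stops at the first cut = the forward scan
theorem pvSelect_past (context : String) (i : Nat) :
    ∀ (cs : List Char) (k : Nat) (start : Int), i < k →
    pvSelect context (i : Int) ((k + cs.length : Nat) : Int) start (pvCutsFrom k cs) =
      PySem.Str.strip (PySem.Str.slice context (some start)
        (some ((pvScanRight cs k : Nat) : Int))) := by
  intro cs
  induction cs with
  | nil => intro k start hk; simp [pvCutsFrom, pvSelect, pvScanRight]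
  | cons c rest ih =>
    intro k start hk
    by_cases h : pvIsTerm c
    · simp only [pvCutsFrom, if_pos h, pvSelect]
      rw [if_neg (by omega : ¬ ((k : Int) + 1 ≤ (i : Int)))]
      simp [pvScanRight, h]
    · simp only [pvCutsFrom, if_neg h]
      have hlen : k + (c :: rest).length = (k + 1) + rest.length := by simp; omega
      rw [hlen, ih (k + 1) start (by omega)]
      simp [pvScanRight, h]
theorem pvSelect_main (context : String) (fullcs : List Char) (i : Nat)
    (hilt : i < fullcs.length) :
    ∀ (m k : Nat) (start : Int), k ≤ i → m = i - k →
      start = ((pvScanLeft fullcs k : Nat) : Int) →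
    pvSelect context (i : Int) ((fullcs.length : Nat) : Int) start
        (pvCutsFrom k (fullcs.drop k)) =
      PySem.Str.strip (PySem.Str.slice context
        (some ((pvScanLeft fullcs i : Nat) : Int))
        (some ((pvScanRight (fullcs.drop i) i : Nat) : Int))) := by
  intro m
  induction m with
  | zero =>
    intro k start hk hm hstart
    have hki : k = i := by omega
    subst hki
    have hdrop : fullcs.drop k = fullcs[k] :: fullcs.drop (k + 1) :=
      List.drop_eq_getElem_cons hilt
    by_cases h : pvIsTerm fullcs[k]
    · rw [hdrop]
      simp only [pvCutsFrom, if_pos h, pvSelect]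
      rw [if_neg (by omega : ¬ ((k : Int) + 1 ≤ (k : Int)))]
      rw [hstart]
      simp [pvScanRight, h]
    · rw [hdrop]
      simp only [pvCutsFrom, if_neg h]
      have hlen : fullcs.length = (k + 1) + (fullcs.drop (k + 1)).length := by
        simp [List.length_drop]; omega
      rw [show ((fullcs.length : Nat) : Int) = (((k + 1) + (fullcs.drop (k + 1)).length : Nat) : Int) by rw [← hlen]]
      rw [pvSelect_past context k (fullcs.drop (k + 1)) (k + 1) start (by omega)]
      rw [hstart]
      simp [pvScanRight, h]
  | succ m ih =>
    intro k start hk hm hstart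
    have hklt : k < i := by omega
    have hkl : k < fullcs.length := by omega
    have hdrop : fullcs.drop k = fullcs[k] :: fullcs.drop (k + 1) :=
      List.drop_eq_getElem_cons hkl
    have hget : fullcs[k]? = some fullcs[k] := List.getElem?_eq_getElem hkl
    by_cases h : pvIsTerm fullcs[k]
    · rw [hdrop]
      simp only [pvCutsFrom, if_pos h, pvSelect]
      rw [if_pos (by omega : ((k : Int) + 1 ≤ (i : Int)))]
      have hs' : ((k : Int) + 1) = ((pvScanLeft fullcs (k + 1) : Nat) : Int) := by
        simp [pvScanLeft, hget, pvIsTermO, h]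
      exact ih (k + 1) ((k : Int) + 1) (by omega) (by omega) hs'
    · rw [hdrop]
      simp only [pvCutsFrom, if_neg h]
      have hs' : start = ((pvScanLeft fullcs (k + 1) : Nat) : Int) := by
        rw [hstart]
        simp [pvScanLeft, hget, pvIsTermO, h]
      exact ih (k + 1) start (by omega) (by omega) hs'
theorem slice_sentence_around_index_py_spec : Claim_equal_slice_sentence_around_index_py := by
  intro context char_index _
  unfold Spec_slice_sentence_around_index_py
  by_cases hctx : context = ""
  · simp [slice_sentence_around_index_py, slice_sentence_around_index_py_alt, hctx]
  · have hcs : context.toList ≠ [] := by simpa using hctx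
    have hn : 0 < context.toList.length := List.length_pos_of_ne_nil hcs
    set n := context.toList.length with hndef
    set i : Nat := if char_index < 0 then 0
      else if char_index ≥ (n : Int) then n - 1 else char_index.toNat with hidef
    have hilt : i < n := by rw [hidef]; split_ifs <;> omega
    rw [slice_sentence_around_index_py, slice_sentence_around_index_py_alt]
    simp only [PySem.Str.len_eq, if_neg hctx, if_neg hcs]
    rw [← hndef]
    have hclampA : (if (if char_index < 0 then (0 : Int) else char_index) ≥ (n : Int)
        then (n : Int) - 1 else if char_index < 0 then (0 : Int) else char_index) = (i : Int) := by
      rw [hidef]; split_ifs <;> omega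
    have hclampB : min (max char_index 0) ((n : Int) - 1) = (i : Int) := by
      rw [hidef]; split_ifs <;> omega
    rw [hclampA, hclampB]
    -- B side: cuts/select loop = the two scans
    rw [pvCuts_eq, show pvCutsFrom 0 context.toList = pvCutsFrom 0 (context.toList.drop 0) by rw [List.drop_zero],
      pvSelect_main context context.toList i (hndef ▸ hilt) i 0 0 (by omega) (by omega)
        (by simp [pvScanLeft])]
    -- A side: rfind/find aggregates = the two scans
    clear_value i
    rw [pvRightA context i (hndef ▸ hilt)]
    simp only [PySem.Str.rfindFrom_eq,
      show ("." : String).toList = ['.'] from rfl,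
      show ("?" : String).toList = ['?'] from rfl,
      show ("!" : String).toList = ['!'] from rfl,
      pvRfindFrom_eq context.toList i (le_of_lt (hndef ▸ hilt)), pvMax3]
    rw [pvLeft_full context.toList i (le_of_lt (hndef ▸ hilt))]
    have hfb : i + (context.toList.drop i).length = n := by
      rw [List.length_drop, ← hndef]
      omega
    have hright := pvRight_main (context.toList.drop i) i
    rw [hfb] at hright
    rw [hright]
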